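-- pv_equiv track=rewrite | github.com/christianebacani/Roadmap | Coding Challenges using Python and SQL/Code Wars Python Solved Problems/7 Kyu/multiple_implications.py | mult_implication
-- ===== SOURCE A (Python) =====
-- def mult_implication(lst: list[bool]) -> bool | None:
--     if lst == []:
--         return None
--
--     if len(lst) == 1:
--         return lst[0]
--
--     implication = None
--
--     if lst[0] is True and lst[1] is False:
--         implication = False
--
--     else:
--         implication = True
--
--     if len(lst) == 2:
--         return implication
--
--     for i in range(2, len(lst)):
--         if implication is True and lst[i] is False:
--             implication = False
--
--         else:
--             implication = True
--
--     return implication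
-- ===== SOURCE B (Python) =====
-- def mult_implication(lst: list[bool]) -> bool | None:
--     if not lst:
--         return None
--     count = 0
--     for e in reversed(lst):
--         if e is False:
--             count += 1
--         else:
--             break
--     return count % 2 == 0
-- ===== Notes on version B (the rewrite author's own statement) =====
-- stated objective: alternative
-- what changed: Replaces the forward implication fold with a backward scan: the fold's result equals the parity of the trailing run of False elements, so B counts consecutive False values from the end (stopping at the first element that is not False) and returns count % 2 == 0.
import Mathlib
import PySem

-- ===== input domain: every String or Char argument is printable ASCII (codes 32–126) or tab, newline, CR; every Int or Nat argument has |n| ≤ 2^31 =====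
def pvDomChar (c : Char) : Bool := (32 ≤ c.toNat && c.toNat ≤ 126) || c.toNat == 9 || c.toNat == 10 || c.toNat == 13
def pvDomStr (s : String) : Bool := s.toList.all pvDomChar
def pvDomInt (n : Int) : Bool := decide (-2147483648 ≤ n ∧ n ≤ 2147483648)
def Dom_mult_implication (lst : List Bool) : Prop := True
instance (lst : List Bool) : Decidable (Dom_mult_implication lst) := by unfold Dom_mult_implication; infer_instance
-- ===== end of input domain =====

-- B replaces A's forward fold by a backward scan counting the trailing run of False
-- elements (its parity determines the result); alternative decomposition, same cost.

-- ===== PORT A =====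
def mult_implication (lst : List Bool) : Option Bool :=
  if lst = [] then none
  else if lst.length = 1 then PySem.List.pyGet? lst 0
  else
    let implication :=
      if PySem.List.pyGetD lst 0 false = true ∧ PySem.List.pyGetD lst 1 false = false
      then false else true
    if lst.length = 2 then some implication
    else
      some ((PySem.List.pyRange 2 (lst.length : Int) 1).foldl
        (fun imp i =>
          if imp = true ∧ PySem.List.pyGetD lst i false = false then false else true)
        implication)

-- ===== PORT B =====
def mult_implication_alt (lst : List Bool) : Option Bool :=
  if lst = [] then none
  else
    some (decide ((lst.reverse.takeWhile (fun e => e == false)).length % 2 = 0))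

-- ===== PRECONDITION & SPEC =====
def Spec_mult_implication (lst : List Bool) (out : Option Bool) : Prop := out = mult_implication_alt lst
instance (lst : List Bool) (out : Option Bool) : Decidable (Spec_mult_implication lst out) := by unfold Spec_mult_implication; infer_instance

-- ===== CLAIM (what is proved, stated in full; the proofs are below) =====
def Claim_equal_mult_implication : Prop := ∀ (lst : List Bool), Dom_mult_implication lst → Spec_mult_implication lst (mult_implication lst)

-- ===== LEMMAS AND PROOFS =====

-- A's loop body as a function of the accumulator and the list element.
def pvStep (imp x : Bool) : Bool := if imp = true ∧ x = false then false else true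

-- trailing run of False elements, B's count
def pvTw (l : List Bool) : Nat := (l.reverse.takeWhile (fun e => e == false)).length

lemma takeWhile_append_all {α : Type} (p : α → Bool) (l l' : List α)
    (h : ∀ b ∈ l, p b = true) :
    (l ++ l').takeWhile p = l ++ l'.takeWhile p := by
  induction l with
  | nil => simp
  | cons b l ih =>
    simp only [List.cons_append, List.takeWhile_cons, h b (by simp)]
    simp [ih (fun b hb => h b (by simp [hb]))]

lemma takeWhile_append_not_all {α : Type} (p : α → Bool) (l l' : List α)
    (h : ∃ b ∈ l, p b = false) :
    (l ++ l').takeWhile p = l.takeWhile p := by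
  induction l with
  | nil => simp at h
  | cons b l ih =>
    by_cases hb : p b = true
    · simp only [List.cons_append, List.takeWhile_cons, hb]
      obtain ⟨c, hc, hcp⟩ := h
      rcases List.mem_cons.mp hc with rfl | hc'
      · simp [hb] at hcp
      · simp [ih ⟨c, hc', hcp⟩]
    · simp only [Bool.not_eq_true] at hb
      simp [hb]

lemma key (l : List Bool) (a : Bool) :
    l.foldl pvStep a =
      if l.all (fun e => e == false) then (a ^^ decide (l.length % 2 = 1))
      else decide (pvTw l % 2 = 0) := by
  induction l using List.reverseRecOn generalizing a with
  | nil => simp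
  | append_singleton l x ih =>
    rw [List.foldl_append]
    cases x with
    | true =>
      have htw : pvTw (l ++ [true]) = 0 := by
        simp [pvTw]
      simp [pvStep, htw]
    | false =>
      have htw : pvTw (l ++ [false]) = pvTw l + 1 := by
        simp [pvTw]
      have hall : (l ++ [false]).all (fun e => e == false) = l.all (fun e => e == false) := by
        simp
      rw [List.foldl_cons, List.foldl_nil, ih, hall]
      by_cases h : l.all (fun e => e == false) = true
      · rw [if_pos h, if_pos h]
        rcases Nat.mod_two_eq_zero_or_one l.length with h2 | h2 <;>
          cases a <;> simp [pvStep, h2, List.length_append, Nat.add_mod]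
      · rw [if_neg h, if_neg h, htw]
        rcases Nat.mod_two_eq_zero_or_one (pvTw l) with h2 | h2 <;>
          simp [pvStep, h2, Nat.add_mod]

lemma bridge (x0 : Bool) (xs : List Bool) :
    xs.foldl pvStep x0 = decide (pvTw (x0 :: xs) % 2 = 0) := by
  rw [key]
  by_cases h : xs.all (fun e => e == false) = true
  · have hrev : ∀ b ∈ xs.reverse, (fun e => e == false) b = true := by
      intro b hb
      exact List.all_eq_true.mp h b (List.mem_reverse.mp hb)
    have htw : pvTw (x0 :: xs) =
        xs.length + (if x0 = false then 1 else 0) := by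
      simp only [pvTw, List.reverse_cons]
      rw [takeWhile_append_all _ _ _ hrev]
      cases x0 <;> simp
    rw [if_pos h, htw]
    rcases Nat.mod_two_eq_zero_or_one xs.length with h2 | h2 <;>
      cases x0 <;> simp [h2, Nat.add_mod]
  · have hrev : ∃ b ∈ xs.reverse, (fun e => e == false) b = false := by
      simp only [List.all_eq_true, not_forall] at h
      obtain ⟨b, hb, hbp⟩ := h
      exact ⟨b, List.mem_reverse.mpr hb, by revert hbp; cases b <;> simp⟩
    have htw : pvTw (x0 :: xs) = pvTw xs := by
      simp only [pvTw, List.reverse_cons]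
      rw [takeWhile_append_not_all _ _ _ hrev]
    rw [if_neg h, htw]

lemma A_eq_fold (x0 x1 : Bool) (xs2 : List Bool) :
    mult_implication (x0 :: x1 :: xs2) = some ((x1 :: xs2).foldl pvStep x0) := by
  have hne : (x0 :: x1 :: xs2 : List Bool) ≠ [] := by simp
  have hl1 : (x0 :: x1 :: xs2).length ≠ 1 := by simp
  have h0 : PySem.List.pyGetD (x0 :: x1 :: xs2) 0 false = x0 :=
    PySem.List.pyGetD_zero_cons x0 (x1 :: xs2) false
  have h1 : PySem.List.pyGetD (x0 :: x1 :: xs2) 1 false = x1 := by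
    rw [PySem.List.pyGetD_ofNat' (x0 :: x1 :: xs2) 1 false]; rfl
  have hfold :
      (PySem.List.pyRange 2 ((x0 :: x1 :: xs2).length : Int) 1).foldl
        (fun imp i =>
          if imp = true ∧ PySem.List.pyGetD (x0 :: x1 :: xs2) i false = false then false
          else true)
        (pvStep x0 x1)
      = xs2.foldl pvStep (pvStep x0 x1) :=
    PySem.List.foldl_pyRange_pyGetD' (x0 :: x1 :: xs2) false pvStep (pvStep x0 x1)
      (a := 2) (by norm_num)
  unfold mult_implication
  rw [if_neg hne, if_neg hl1]
  simp only [h0, h1]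
  show (if (x0 :: x1 :: xs2).length = 2 then some (if x0 = true ∧ x1 = false then false else true)
        else some ((PySem.List.pyRange 2 ((x0 :: x1 :: xs2).length : Int) 1).foldl
          (fun imp i =>
            if imp = true ∧ PySem.List.pyGetD (x0 :: x1 :: xs2) i false = false then false
            else true) (if x0 = true ∧ x1 = false then false else true))) = _
  show (if (x0 :: x1 :: xs2).length = 2 then some (pvStep x0 x1)
        else some ((PySem.List.pyRange 2 ((x0 :: x1 :: xs2).length : Int) 1).foldl
          (fun imp i =>
            if imp = true ∧ PySem.List.pyGetD (x0 :: x1 :: xs2) i false = false then false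
            else true) (pvStep x0 x1))) = _
  by_cases h2 : xs2 = []
  · subst h2
    rw [if_pos (show ([x0, x1] : List Bool).length = 2 from rfl)]
    rfl
  · have hl2 : (x0 :: x1 :: xs2).length ≠ 2 := by simp [h2]
    rw [if_neg hl2, hfold, List.foldl_cons]

-- ===== VERDICT (by name: the statement is the Claim_ definition above) =====
theorem mult_implication_spec : Claim_equal_mult_implication := by
  intro lst _
  unfold Spec_mult_implication
  match lst with
  | [] => rfl
  | [x0] =>
    have hb := bridge x0 []
    simp only [List.foldl_nil] at hb
    simp [mult_implication, mult_implication_alt, PySem.List.pyGet?,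
      PySem.List.pyIdx?, pvTw] at hb ⊢
    simpa [pvTw] using hb
  | x0 :: x1 :: xs2 =>
    rw [A_eq_fold, List.foldl_cons, ← List.foldl_cons, bridge]
    simp [mult_implication_alt, pvTw]
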